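-- pv_equiv track=rewrite | github.com/pbbcache/cachesim | simulator/common/simulator_results.py | mirror_mask
-- ===== SOURCE A (Python) =====
-- def mirror_mask(mask,nr_ways):
-- 	low_bit=0
-- 	count=0
-- 	found=False
-- 	hex_mask=int(mask,16)
-- 	half_idx=nr_ways/2
--
-- ## Find first bit
-- 	for i in range(nr_ways):
-- 		is_one=((hex_mask & 1<<i)!=0)
-- 		if not found and is_one:
-- 			low_bit=i
-- 			count=1
-- 			found=1
-- 		elif found:
-- 			if is_one:
-- 				count+=1
-- 			else:
-- 				break ## Nothing else to parse
--
-- 	high_bit=low_bit+count-1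
--
--
-- 	if high_bit<=nr_ways/2: ## Beyond half (move right)
-- 		new_high=nr_ways-1-low_bit
-- 		new_low=new_high-count+1
-- 	else:
-- 		new_low=nr_ways-1-high_bit
--
-- 	return hex(((1<<count)-1)<<new_low)
-- ===== SOURCE B (Python) =====
-- def mirror_mask(mask, nr_ways):
--     # Bit tricks instead of a bit-by-bit scan: isolate the lowest set bit and the
--     # length of the first contiguous run of ones; both mirror branches of the
--     # original reduce to the single formula nr_ways - low_bit - count.
--     m = int(mask, 16) & ((1 << nr_ways) - 1)
--     if m == 0:
--         low_bit = 0
--         count = 0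
--     else:
--         low_bit = (m & -m).bit_length() - 1
--         run = (m >> low_bit) + 1
--         count = (run & -run).bit_length() - 1
--     return hex(((1 << count) - 1) << (nr_ways - low_bit - count))
-- ===== Notes on version B (the rewrite author's own statement) =====
-- stated objective: faster
-- what changed: Replaces the per-bit scanning loop (with found/break flags and a redundant two-branch mirror formula) by a constant number of big-integer bit operations: mask to nr_ways bits, isolate the lowest set bit and the first run length via m&-m / bit_length, and use the single closed-form shift nr_ways-low_bit-count (the two branches of A compute the same value).
import Mathlib
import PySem

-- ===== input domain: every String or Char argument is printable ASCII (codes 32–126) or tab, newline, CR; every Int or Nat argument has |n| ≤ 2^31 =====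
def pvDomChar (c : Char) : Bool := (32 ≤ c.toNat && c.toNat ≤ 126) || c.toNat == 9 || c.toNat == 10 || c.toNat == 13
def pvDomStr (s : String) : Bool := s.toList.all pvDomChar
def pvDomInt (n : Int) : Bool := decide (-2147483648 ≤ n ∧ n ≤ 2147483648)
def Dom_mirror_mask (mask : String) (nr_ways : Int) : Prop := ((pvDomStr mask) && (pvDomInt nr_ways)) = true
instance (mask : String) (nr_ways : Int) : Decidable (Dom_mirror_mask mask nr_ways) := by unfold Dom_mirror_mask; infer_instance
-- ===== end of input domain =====

-- B replaces A's per-bit scanning loop by big-integer bit tricks (lowest set bit /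
-- run length via m&-m and bit_length) and a single closed-form shift; objective: faster.

-- ===== PORT A =====
-- hex(n) ported by hand (exact: lowercase digits, "0x" prefix, "-" for negatives)
def hexChar (n : Nat) : Char := if n < 10 then Char.ofNat (48 + n) else Char.ofNat (87 + n)

def hexDigs (n : Nat) : List Char :=
  if _h : n < 16 then [hexChar n]
  else hexDigs (n / 16) ++ [hexChar (n % 16)]
  decreasing_by exact Nat.div_lt_self (by omega) (by omega)

def pyHex (v : Int) : String :=
  if v < 0 then String.ofList ('-' :: '0' :: 'x' :: hexDigs (-v).toNat)
  else String.ofList ('0' :: 'x' :: hexDigs v.toNat)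

-- one iteration of A's for-loop; state = (low_bit, count, found, broken); broken models `break`
def mirrorStepA (hex_mask : Int) (st : Int × Int × Bool × Bool) (i : Int) : Int × Int × Bool × Bool :=
  if st.2.2.2 then st       -- after `break`: the loop body no longer runs
  else if st.2.2.1 = false ∧ PySem.Int.band hex_mask ((1 : Int) <<< i.toNat) ≠ 0 then (i, 1, true, false)
  else if st.2.2.1 = true then
    if PySem.Int.band hex_mask ((1 : Int) <<< i.toNat) ≠ 0 then (st.1, st.2.1 + 1, true, false)
    else (st.1, st.2.1, st.2.2.1, true)        -- break
  else st

def mirror_mask (mask : String) (nr_ways : Int) : String :=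
  match PySem.Int.ofStrBase? mask 16 with
  | none => ""               -- int(mask,16) raises ValueError: excluded by Pre_
  | some hex_mask =>
    let st := (PySem.List.pyRange 0 nr_ways 1).foldl (mirrorStepA hex_mask) (0, 0, false, false)
    let low_bit := st.1
    let count := st.2.1
    let high_bit := low_bit + count - 1
    -- Python compares high_bit <= nr_ways/2 in float arithmetic, exact for |nr_ways| ≤ 2^31: same as 2*high_bit ≤ nr_ways
    let new_low :=
      if 2 * high_bit ≤ nr_ways then
        let new_high := nr_ways - 1 - low_bit
        new_high - count + 1
      else nr_ways - 1 - high_bit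
    -- Python raises on a negative shift amount; Pre_ (0 ≤ nr_ways) makes count, new_low ≥ 0
    pyHex ((((1 : Int) <<< count.toNat) - 1) <<< new_low.toNat)

-- ===== PORT B =====
def mirror_mask_alt (mask : String) (nr_ways : Int) : String :=
  match PySem.Int.ofStrBase? mask 16 with
  | none => ""               -- int(mask,16) raises ValueError: excluded by Pre_
  | some v =>
    -- Python raises on a negative shift amount; Pre_ (0 ≤ nr_ways) is exact here
    let m := PySem.Int.band v (((1 : Int) <<< nr_ways.toNat) - 1)
    let lc : Int × Int :=
      if m = 0 then (0, 0)
      else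
        let low_bit := (PySem.Int.bitLength (PySem.Int.band m (-m)) : Int) - 1
        let run := (m >>> low_bit.toNat) + 1
        (low_bit, (PySem.Int.bitLength (PySem.Int.band run (-run)) : Int) - 1)
    pyHex ((((1 : Int) <<< lc.2.toNat) - 1) <<< (nr_ways - lc.1 - lc.2).toNat)

-- ===== PRECONDITION & SPEC =====
-- Pre_ excludes exactly the inputs where A raises: mask not a valid base-16 int literal
-- (ValueError from int(mask,16)) or nr_ways < 0 (ValueError: negative shift count). B raises there too.
def Pre_mirror_mask (mask : String) (nr_ways : Int) : Prop :=
  (PySem.Int.ofStrBase? mask 16).isSome ∧ 0 ≤ nr_ways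
instance (mask : String) (nr_ways : Int) : Decidable (Pre_mirror_mask mask nr_ways) := by
  unfold Pre_mirror_mask; infer_instance

def pvWitness_mirror_mask : String × Int := ("0x3c", 8)

def Spec_mirror_mask (mask : String) (nr_ways : Int) (out : String) : Prop := out = mirror_mask_alt mask nr_ways
instance (mask : String) (nr_ways : Int) (out : String) : Decidable (Spec_mirror_mask mask nr_ways out) := by unfold Spec_mirror_mask; infer_instance

-- ===== CLAIM (what is proved, stated in full; the proofs are below) =====
def Claim_equal_mirror_mask : Prop := ∀ (mask : String) (nr_ways : Int), Dom_mirror_mask mask nr_ways → Pre_mirror_mask mask nr_ways → Spec_mirror_mask mask nr_ways (mirror_mask mask nr_ways)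

-- ===== LEMMAS AND PROOFS =====

theorem pv_compl_testBit : ∀ (k x i : Nat), x < 2^k → i < k → (2^k - 1 - x).testBit i = !(x.testBit i) := by
  intro k
  induction k with
  | zero => omega
  | succ k ih =>
    intro x i hx hi
    have hP : 2^(k+1) = 2 * 2^k := by ring
    cases i with
    | zero =>
      simp only [Nat.testBit_zero]
      have h2 : (2^(k+1) - 1 - x) % 2 = 1 - x % 2 := by omega
      rcases Nat.mod_two_eq_zero_or_one x with h | h <;> simp [h2, h]
    | succ i =>
      rw [Nat.testBit_succ, Nat.testBit_succ]
      have hdiv : (2^(k+1) - 1 - x) / 2 = 2^k - 1 - x / 2 := by omega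
      rw [hdiv]
      exact ih (x / 2) i (by omega) (by omega)

theorem pv_odd_and_pred (a : Nat) (ha : a % 2 = 1) : a &&& (a - 1) = a - 1 := by
  apply Nat.eq_of_testBit_eq
  intro i
  cases i with
  | zero =>
    simp only [Nat.testBit_zero]
    have : (a - 1) % 2 = 0 := by omega
    simp [this]
  | succ i =>
    rw [Nat.testBit_and]
    simp only [Nat.testBit_succ]
    have : (a - 1) / 2 = a / 2 := by omega
    rw [this, Bool.and_self]

theorem pv_double_and_pred (a : Nat) (ha : 0 < a) : (2 * a) &&& (2 * a - 1) = 2 * (a &&& (a - 1)) := by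
  apply Nat.eq_of_testBit_eq
  intro i
  cases i with
  | zero =>
    simp only [Nat.testBit_zero]
    have h1 : (2 * a) % 2 = 0 := by omega
    simp [h1]
  | succ i =>
    rw [Nat.testBit_and]
    simp only [Nat.testBit_succ]
    have h1 : (2 * a) / 2 = a := by omega
    have h2 : (2 * a - 1) / 2 = a - 1 := by omega
    have h3 : (2 * (a &&& (a - 1))) / 2 = a &&& (a - 1) := by omega
    rw [h1, h2, h3, ← Nat.testBit_and]

theorem pv_lowbit : ∀ (l a : Nat), a % 2 = 1 → (2^l * a) - ((2^l * a) &&& (2^l * a - 1)) = 2^l := by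
  intro l
  induction l with
  | zero =>
    intro a ha
    simp only [pow_zero, one_mul]
    rw [pv_odd_and_pred a ha]
    omega
  | succ l ih =>
    intro a ha
    have hpos : 0 < 2 ^ l * a := Nat.mul_pos (Nat.two_pow_pos l) (by omega)
    have h1 : 2^(l+1) * a = 2 * (2^l * a) := by ring
    have hp : 2^(l+1) = 2 * 2^l := by ring
    rw [h1, pv_double_and_pred _ hpos]
    have := ih a ha
    omega

theorem pv_emod_neg (v : Int) (P : Nat) (hv : v < 0) (hP : 0 < P) :
    v % (P : Int) = ((P - 1 - ((-v-1).toNat % P) : Nat) : Int) := by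
  set n : Nat := (-v-1).toNat with hdefn
  have h1 : n % P < P := Nat.mod_lt _ hP
  have h2 : n % P + P * (n / P) = n := Nat.mod_add_div n P
  have hn : v = -((n : Int) + 1) := by omega
  have hsplit : v = ((P - 1 - (n % P) : Nat) : Int) + (P : Int) * (-(((n / P : Nat)) : Int) - 1) := by
    have hc2 : (P : Int) * (-(((n / P : Nat)) : Int) - 1) = -(((P * (n / P) : Nat)) : Int) - (P : Int) := by
      push_cast; ring
    have hc3 : P * (n / P) + n % P = n := Nat.div_add_mod n P
    rw [hc2]
    omega
  rw [hsplit, Int.add_mul_emod_self_left]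
  apply Int.emod_eq_of_lt
  · positivity
  · omega

theorem pv_emod_nonneg_toNat (v : Int) (P : Nat) (hv : 0 ≤ v) :
    (v % (P : Int)).toNat = v.toNat % P := by
  obtain ⟨a, rfl⟩ := Int.eq_ofNat_of_zero_le hv
  rw [show (((a : Int)).toNat) = a from Int.toNat_natCast a,
      show ((a : Int) % (P : Int)) = ((a % P : Nat) : Int) from (Int.natCast_mod a P).symm,
      Int.toNat_natCast]

theorem pv_mask_band (v : Int) (k : Nat) :
    PySem.Int.band v (((1 : Int) <<< k) - 1) = (((v % (((2^k : Nat) : Int))).toNat : Nat) : Int) := by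
  have hP : 0 < 2^k := Nat.two_pow_pos k
  have hsh : ((1 : Int) <<< k) - 1 = ((2^k - 1 : Nat) : Int) := by
    rw [Int.shiftLeft_eq]
    have : (2:Int)^k = ((2^k : Nat) : Int) := by push_cast; ring
    omega
  rw [hsh]
  by_cases hv : 0 ≤ v
  · rw [PySem.Int.band_of_nonneg hv (by positivity)]
    rw [pv_emod_nonneg_toNat v _ hv, Int.toNat_natCast, Nat.and_two_pow_sub_one_eq_mod]
  · have hvneg : v < 0 := by omega
    rw [pv_emod_neg v _ hvneg hP, Int.toNat_natCast]
    simp only [PySem.Int.band, if_neg hv, if_pos (show (0:Int) ≤ ((2^k - 1 : Nat) : Int) by positivity)]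
    rw [Int.toNat_natCast]
    have hneg : (-(((2^k - 1 : Nat)) : Int) - 1).toNat = 0 := by
      apply Int.toNat_of_nonpos; omega
    congr 1
    have : (-v - 1).toNat &&& (2^k - 1) = (-v - 1).toNat % 2^k := Nat.and_two_pow_sub_one_eq_mod _ k
    rw [Nat.and_comm, this]

theorem pv_bit_band (v : Int) (k i : Nat) (hik : i < k) :
    (PySem.Int.band v ((1 : Int) <<< i) = 0) ↔ ((v % (((2^k : Nat) : Int))).toNat).testBit i = false := by
  have hP : 0 < 2^k := Nat.two_pow_pos k
  have hsh : ((1 : Int) <<< i) = ((2^i : Nat) : Int) := by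
    rw [Int.shiftLeft_eq]; push_cast; ring
  rw [hsh]
  by_cases hv : 0 ≤ v
  · rw [PySem.Int.band_of_nonneg hv (by positivity), pv_emod_nonneg_toNat v _ hv,
        Int.toNat_natCast, Nat.testBit_mod_two_pow, Nat.and_two_pow]
    rcases hb : v.toNat.testBit i with _ | _ <;>
      simp [hik]
  · have hvneg : v < 0 := by omega
    rw [pv_emod_neg v _ hvneg hP, Int.toNat_natCast]
    simp only [PySem.Int.band, if_neg hv, if_pos (show (0:Int) ≤ ((2^i : Nat) : Int) by positivity)]
    rw [Int.toNat_natCast, Nat.two_pow_and]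
    have hx : (-v - 1).toNat % 2^k < 2^k := Nat.mod_lt _ hP
    rw [pv_compl_testBit k _ i hx hik, Nat.testBit_mod_two_pow]
    rcases hb : (-v - 1).toNat.testBit i with _ | _ <;>
      simp [hik]

theorem pv_band_neg_self (M : Nat) (hM : 0 < M) :
    PySem.Int.band (M : Int) (-(M : Int)) = ((M - (M &&& (M - 1)) : Nat) : Int) := by
  simp only [PySem.Int.band,
    if_pos (show (0:Int) ≤ (M : Int) by positivity),
    if_neg (show ¬ (0:Int) ≤ -(M : Int) by omega)]
  have e1 : ((M : Int)).toNat = M := by omega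
  have e2 : ((- -(M : Int) - 1)).toNat = M - 1 := by omega
  rw [e1, e2]

theorem pv_bitLength_two_pow : ∀ (t : Nat), PySem.Int.bitLength ((2^t : Nat) : Int) = t + 1 := by
  intro t
  induction t with
  | zero =>
    rw [PySem.Int.bitLength_natCast (by norm_num)]
    norm_num
  | succ t ih =>
    rw [PySem.Int.bitLength_natCast (Nat.two_pow_pos (t+1))]
    rw [show (2^(t+1)/2 : Nat) = 2^t by omega]
    rw [ih]

theorem pv_decomp : ∀ (M : Nat), 0 < M → ∃ l c r, 0 < c ∧ M = 2^l * (2^c - 1 + 2^(c+1) * r) := by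
  intro M
  induction M using Nat.strong_induction_on with
  | _ M ih =>
    intro hM
    rcases Nat.mod_two_eq_zero_or_one M with he | ho
    · -- even
      obtain ⟨l, c, r, hc, hrep⟩ := ih (M / 2) (by omega) (by omega)
      refine ⟨l + 1, c, r, hc, ?_⟩
      have h2 : M = 2 * (M / 2) := by omega
      rw [h2, hrep]; ring
    · -- odd
      by_cases h1 : M = 1
      · exact ⟨0, 1, 0, by omega, by subst h1; norm_num⟩
      · have ha : 0 < M / 2 := by omega
        rcases Nat.mod_two_eq_zero_or_one (M / 2) with hae | hao
        · -- M ≡ 1 mod 4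
          refine ⟨0, 1, M / 4, by omega, ?_⟩
          have : 2^(1+1) = 4 := by norm_num
          simp only [pow_zero, one_mul, this]
          omega
        · obtain ⟨l, c, r, hc, hrep⟩ := ih (M / 2) (by omega) ha
          have hl0 : l = 0 := by
            by_contra hne
            have : 2 ∣ 2^l := dvd_pow_self 2 hne
            have : M / 2 % 2 = 0 := by
              obtain ⟨w, hw⟩ := this
              rw [hrep, hw, mul_assoc]
              simp [Nat.mul_mod_right]
            omega
          subst hl0
          simp only [pow_zero, one_mul] at hrep
          refine ⟨0, c + 1, r, by omega, ?_⟩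
          have hM2 : M = 2 * (M / 2) + 1 := by omega
          have e1 : (2:Nat)^(c+1) = 2 * 2^c := by ring
          have e4 : (2:Nat)^(c+1) * r = 2 * (2^c * r) := by ring
          have e5 : (2:Nat)^(c+1+1) * r = 4 * (2^c * r) := by ring
          have e3 : 0 < (2:Nat)^c := Nat.two_pow_pos c
          rw [pow_zero, one_mul, e5, e1]
          rw [e4] at hrep
          omega

-- bits of u = 2^c - 1 + 2^(c+1) * r : ones below c, zero at c
theorem pv_u_testBit (c r j : Nat) (hj : j ≤ c) :
    (2^c - 1 + 2^(c+1) * r).testBit j = decide (j < c) := by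
  have e1 : (2:Nat)^(c+1) = 2 * 2^c := by ring
  have e3 : 0 < (2:Nat)^c := Nat.two_pow_pos c
  have hmod : (2^c - 1 + 2^(c+1) * r) % 2^(c+1) = 2^c - 1 := by
    rw [Nat.add_mul_mod_self_left, Nat.mod_eq_of_lt (by omega)]
  have : (2^c - 1 + 2^(c+1) * r).testBit j
      = ((2^c - 1 + 2^(c+1) * r) % 2^(c+1)).testBit j := by
    rw [Nat.testBit_mod_two_pow]
    simp [show j < c + 1 by omega]
  rw [this, hmod, Nat.testBit_two_pow_sub_one]

theorem pv_M_testBit (l c r i : Nat) :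
    (2^l * (2^c - 1 + 2^(c+1) * r)).testBit i
      = (decide (l ≤ i) && (2^c - 1 + 2^(c+1) * r).testBit (i - l)) := by
  rw [mul_comm, Nat.testBit_mul_two_pow]

theorem pv_loop_done (v : Int) : ∀ (l : List Int) (st : Int × Int × Bool × Bool),
    st.2.2.2 = true → l.foldl (mirrorStepA v) st = st := by
  intro l
  induction l with
  | nil => intro st h; rfl
  | cons x xs ih =>
    intro st h
    have hstep : mirrorStepA v st x = st := by
      simp [mirrorStepA, h]
    rw [List.foldl_cons, hstep, ih st h]

theorem pv_loop_zeros (v : Int) : ∀ (n : Nat) (a lb cnt : Int),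
    (∀ i : Int, a ≤ i → i < a + n → PySem.Int.band v ((1:Int) <<< i.toNat) = 0) →
    (PySem.List.pyRange a (a + n) 1).foldl (mirrorStepA v) (lb, cnt, false, false) = (lb, cnt, false, false) := by
  intro n
  induction n with
  | zero =>
    intro a lb cnt _h
    rw [show a + ((0:Nat):Int) = a by omega, PySem.List.pyRange_one_eq_nil (le_refl a)]
    rfl
  | succ n ih =>
    intro a lb cnt h
    rw [PySem.List.pyRange_one_cons (by omega), List.foldl_cons]
    have hstep : mirrorStepA v (lb, cnt, false, false) a = (lb, cnt, false, false) := by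
      simp [mirrorStepA, h a (le_refl a) (by omega)]
    rw [hstep, show a + ((n+1:Nat):Int) = (a+1) + ((n:Nat):Int) by omega]
    exact ih (a+1) lb cnt (fun i h1 h2 => h i (by omega) (by omega))

theorem pv_loop_ones (v : Int) : ∀ (n : Nat) (a lb cnt : Int),
    (∀ i : Int, a ≤ i → i < a + n → PySem.Int.band v ((1:Int) <<< i.toNat) ≠ 0) →
    (PySem.List.pyRange a (a + n) 1).foldl (mirrorStepA v) (lb, cnt, true, false) = (lb, cnt + n, true, false) := by
  intro n
  induction n with
  | zero =>
    intro a lb cnt _h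
    rw [show a + ((0:Nat):Int) = a by omega, PySem.List.pyRange_one_eq_nil (le_refl a)]
    simp
  | succ n ih =>
    intro a lb cnt h
    rw [PySem.List.pyRange_one_cons (by omega), List.foldl_cons]
    have hstep : mirrorStepA v (lb, cnt, true, false) a = (lb, cnt + 1, true, false) := by
      simp [mirrorStepA, h a (le_refl a) (by omega)]
    rw [hstep, show a + ((n+1:Nat):Int) = (a+1) + ((n:Nat):Int) by omega]
    rw [ih (a+1) lb (cnt+1) (fun i h1 h2 => h i (by omega) (by omega))]
    simp only [Prod.mk.injEq, and_true, true_and]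
    omega

theorem pv_main (mask : String) (nr_ways : Int) (hpre1 : (PySem.Int.ofStrBase? mask 16).isSome)
    (hpre2 : 0 ≤ nr_ways) : mirror_mask mask nr_ways = mirror_mask_alt mask nr_ways := by
  obtain ⟨v, hv⟩ := Option.isSome_iff_exists.mp hpre1
  obtain ⟨k, rfl⟩ : ∃ k : Nat, nr_ways = (k : Int) := ⟨nr_ways.toNat, by omega⟩
  unfold mirror_mask mirror_mask_alt
  rw [hv]
  simp only [Int.toNat_natCast]
  rw [pv_mask_band v k]
  set M : Nat := (v % ((2^k : Nat) : Int)).toNat with hMdef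
  by_cases hM0 : M = 0
  · -- empty mask: the loop never finds a bit
    have h0 : ∀ i : Int, (0:Int) ≤ i → i < 0 + (k:Int) → PySem.Int.band v ((1:Int) <<< i.toNat) = 0 := by
      intro i h1 h2
      exact (pv_bit_band v k i.toNat (by omega)).mpr (by rw [← hMdef, hM0]; exact Nat.zero_testBit _)
    have hA := pv_loop_zeros v k 0 0 0 h0
    rw [zero_add] at hA
    rw [hA]
    simp only [hM0]
    norm_num
  · -- M > 0: decompose into lowest set bit l and run length c
    have hMpos : 0 < M := by omega
    obtain ⟨l, c, r, hc, hrep⟩ := pv_decomp M hMpos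
    set u : Nat := 2^c - 1 + 2^(c+1) * r with hu
    have e3 : 0 < (2:Nat)^c := Nat.two_pow_pos c
    have e2c : (2:Nat)^c = 2 * 2^(c-1) := by
      rw [← pow_succ']; congr 1; omega
    have e4 : (2:Nat)^(c+1) * r = 2 * (2^c * r) := by ring
    have hu_odd : u % 2 = 1 := by rw [hu, e4]; omega
    have hMlt : M < 2^k := by
      have h1 : 0 ≤ v % ((2^k:Nat):Int) := Int.emod_nonneg v (by positivity)
      have h2 : v % ((2^k:Nat):Int) < ((2^k:Nat):Int) := Int.emod_lt_of_pos v (by positivity)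
      omega
    have hlck : l + c ≤ k := by
      have hcm : 2^(c-1) ≤ u := by rw [hu]; omega
      have h1 : 2^l * 2^(c-1) ≤ 2^l * u := Nat.mul_le_mul_left _ hcm
      have h3 : 2^(l+(c-1)) < 2^k := by
        rw [pow_add]
        exact lt_of_le_of_lt (le_trans h1 (le_of_eq hrep.symm)) hMlt
      have h5 : l + (c-1) < k := (Nat.pow_lt_pow_iff_right (by norm_num)).mp h3
      omega
    have hlk : l < k := by omega
    have tb : ∀ i : Nat, M.testBit i = (decide (l ≤ i) && u.testBit (i - l)) := by
      intro i; rw [hrep]; exact pv_M_testBit l c r i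
    have tbu : ∀ j, j ≤ c → u.testBit j = decide (j < c) := fun j hj => pv_u_testBit c r j hj
    have hbit : ∀ i : Nat, i < k →
        ((PySem.Int.band v ((1:Int) <<< i) = 0) ↔ M.testBit i = false) := by
      intro i hi
      rw [← hMdef] at *
      exact pv_bit_band v k i hi
    -- phase 1: all bits below l are zero
    have h0 : ∀ i : Int, (0:Int) ≤ i → i < 0 + (l:Int) →
        PySem.Int.band v ((1:Int) <<< i.toNat) = 0 := by
      intro i h1 h2
      apply (hbit i.toNat (by omega)).mpr
      rw [tb]
      simp [show ¬ (l ≤ i.toNat) by omega]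
    have hA1 := pv_loop_zeros v l 0 0 0 h0
    rw [zero_add] at hA1
    -- the bit at l is set
    have hbl : PySem.Int.band v ((1:Int) <<< l) ≠ 0 := by
      intro hz
      have := (hbit l hlk).mp hz
      rw [tb, Nat.sub_self, tbu 0 (by omega)] at this
      simp [hc] at this
    have hstepl : mirrorStepA v (0, 0, false, false) (l:Int) = ((l:Int), 1, true, false) := by
      simp only [mirrorStepA, Int.toNat_natCast]
      simp [hbl]
    -- phase 2: the c-1 bits after l are set
    have h1s : ∀ i : Int, ((l:Int)+1) ≤ i → i < ((l:Int)+1) + ((c-1 : Nat):Int) →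
        PySem.Int.band v ((1:Int) <<< i.toNat) ≠ 0 := by
      intro i hi1 hi2 hz
      have hik : i.toNat < k := by omega
      have := (hbit i.toNat hik).mp hz
      rw [tb, tbu (i.toNat - l) (by omega)] at this
      simp [show l ≤ i.toNat by omega, show i.toNat - l < c by omega] at this
    have hA2 := pv_loop_ones v (c-1) ((l:Int)+1) (l:Int) 1 h1s
    rw [show ((l:Int)+1) + ((c-1 : Nat):Int) = ((l+c : Nat):Int) by push_cast; omega,
        show (1:Int) + ((c-1 : Nat):Int) = ((c:Nat):Int) by omega] at hA2
    -- phase 3: break (or end of range) at bit l+c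
    have hA3 : ∃ d, List.foldl (mirrorStepA v) ((l:Int), ((c:Nat):Int), true, false)
        (PySem.List.pyRange ((l+c : Nat):Int) (k:Int) 1) = ((l:Int), ((c:Nat):Int), true, d) := by
      by_cases hE : l + c = k
      · refine ⟨false, ?_⟩
        rw [hE, PySem.List.pyRange_one_eq_nil (le_refl _)]
        rfl
      · have hlt : l + c < k := by omega
        have hbe : PySem.Int.band v ((1:Int) <<< (l+c)) = 0 := by
          apply (hbit (l+c) hlt).mpr
          rw [tb, Nat.add_sub_cancel_left, tbu c (by omega)]
          simp
        refine ⟨true, ?_⟩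
        rw [PySem.List.pyRange_one_cons (by omega), List.foldl_cons]
        have hstep : mirrorStepA v ((l:Int), ((c:Nat):Int), true, false) ((l+c : Nat):Int)
            = ((l:Int), ((c:Nat):Int), true, true) := by
          simp only [mirrorStepA, Int.toNat_natCast]
          simp [hbe]
        rw [hstep]
        exact pv_loop_done v _ _ rfl
    obtain ⟨d, hA3⟩ := hA3
    -- assemble the loop value
    have hA : List.foldl (mirrorStepA v) (0, 0, false, false) (PySem.List.pyRange 0 (k:Int) 1)
        = ((l:Int), ((c:Nat):Int), true, d) := by
      rw [PySem.List.pyRange_one_append 0 (l:Int) (k:Int) (by omega) (by omega),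
          List.foldl_append, hA1,
          PySem.List.pyRange_one_cons (show (l:Int) < (k:Int) by omega),
          List.foldl_cons, hstepl,
          PySem.List.pyRange_one_append ((l:Int)+1) ((l+c : Nat):Int) (k:Int) (by omega) (by omega),
          List.foldl_append, hA2, hA3]
    -- B-side values
    have hband1 : PySem.Int.band ((M:Nat):Int) (-((M:Nat):Int)) = (((2^l : Nat)):Int) := by
      rw [pv_band_neg_self M hMpos]
      congr 1
      rw [hrep]
      exact pv_lowbit l u hu_odd
    have hu1 : u + 1 = 2^c * (2*r+1) := by
      have : (2:Nat)^c * (2*r+1) = 2^c + 2^(c+1) * r := by ring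
      omega
    have hshr : M >>> l = u := by
      rw [Nat.shiftRight_eq_div_pow, hrep, Nat.mul_div_cancel_left u (Nat.two_pow_pos l)]
    have hband2 : PySem.Int.band (((u+1 : Nat)):Int) (-(((u+1 : Nat)):Int)) = (((2^c : Nat)):Int) := by
      rw [pv_band_neg_self (u+1) (by omega)]
      congr 1
      rw [hu1]
      exact pv_lowbit c (2*r+1) (by omega)
    rw [hA, if_neg (show ¬ ((M:Nat):Int) = 0 by exact_mod_cast hM0), hband1,
        pv_bitLength_two_pow l,
        show ((l+1 : Nat):Int) - 1 = ((l:Nat):Int) by push_cast; ring]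
    simp only [Int.toNat_natCast]
    rw [show ((M:Nat):Int) >>> l = ((u:Nat):Int) by rw [← Int.natCast_shiftRight, hshr],
        show ((u:Nat):Int) + 1 = (((u+1:Nat)):Int) by push_cast; ring,
        hband2, pv_bitLength_two_pow c,
        show ((c+1 : Nat):Int) - 1 = ((c:Nat):Int) by push_cast; ring]
    simp only [Int.toNat_natCast]
    have hnl1 : ((k:Int) - 1 - (l:Int) - (c:Int) + 1).toNat = ((k:Int) - (l:Int) - (c:Int)).toNat := by omega
    have hnl2 : ((k:Int) - 1 - ((l:Int) + (c:Int) - 1)).toNat = ((k:Int) - (l:Int) - (c:Int)).toNat := by omega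
    split_ifs <;> simp only [hnl1, hnl2]

-- ===== VERDICT (by name: the statement is the Claim_ definition above) =====
theorem mirror_mask_spec : Claim_equal_mirror_mask := by
  intro mask nr_ways _hdom hpre
  unfold Spec_mirror_mask
  exact pv_main mask nr_ways hpre.1 hpre.2
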